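-- pv_equiv track=rewrite | github.com/parthjpatel99/Bctci-code-solutions | two pointers/quicksort_partition.py | is_valid_partition
-- ===== SOURCE A (Python) =====
-- def is_valid_partition(arr, pivot):
--     # Find boundaries between sections
--     first = 0
--     while first < len(arr) and arr[first] < pivot:
--         first += 1
--     second = first
--     while second < len(arr) and arr[second] == pivot:
--         second += 1
--
--     # Check that all elements are in their correct sections
--     for i in range(first):
--         if arr[i] >= pivot:
--             return False
--     for i in range(first, second):
--         if arr[i] != pivot:
--             return False
--     for i in range(second, len(arr)):
--         if arr[i] <= pivot:
--             return False
--     return True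
-- ===== SOURCE B (Python) =====
-- def is_valid_partition(arr, pivot):
--     phase = 0
--     for x in arr:
--         if phase == 0:
--             if x < pivot:
--                 continue
--             phase = 1
--         if phase == 1:
--             if x == pivot:
--                 continue
--             phase = 2
--         if x <= pivot:
--             return False
--     return True
-- ===== Notes on version B (the rewrite author's own statement) =====
-- stated objective: simpler
-- what changed: Replaced the two boundary-finding index while-loops plus three verification passes with a single forward pass carrying a phase variable (less-than / equal / greater phases).
import Mathlib
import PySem

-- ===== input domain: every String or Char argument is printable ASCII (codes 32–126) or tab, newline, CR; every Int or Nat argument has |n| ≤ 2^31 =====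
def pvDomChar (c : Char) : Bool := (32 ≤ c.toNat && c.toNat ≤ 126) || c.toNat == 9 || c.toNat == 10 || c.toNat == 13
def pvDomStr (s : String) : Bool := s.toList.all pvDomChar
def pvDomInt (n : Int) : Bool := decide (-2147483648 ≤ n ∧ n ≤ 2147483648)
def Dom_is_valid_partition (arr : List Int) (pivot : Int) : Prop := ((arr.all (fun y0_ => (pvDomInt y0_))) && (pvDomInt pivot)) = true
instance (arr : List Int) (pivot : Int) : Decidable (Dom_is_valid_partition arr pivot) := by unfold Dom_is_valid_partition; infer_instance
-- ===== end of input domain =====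

-- B replaces the two boundary-finding while loops plus three verification loops with one
-- forward pass carrying a phase variable; equal results are proved for all inputs (simpler, same cost).


-- ===== PORT A =====
-- while first < len(arr) and arr[first] < pivot: first += 1
def pvWhileLt (arr : List Int) (pivot : Int) (first : Nat) : Nat :=
  if h : first < arr.length then
    if arr[first] < pivot then pvWhileLt arr pivot (first + 1) else first
  else first
termination_by arr.length - first

-- while second < len(arr) and arr[second] == pivot: second += 1
def pvWhileEq (arr : List Int) (pivot : Int) (second : Nat) : Nat :=
  if h : second < arr.length then
    if arr[second] = pivot then pvWhileEq arr pivot (second + 1) else second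
  else second
termination_by arr.length - second

def is_valid_partition (arr : List Int) (pivot : Int) : Bool :=
  let first := pvWhileLt arr pivot 0
  let second := pvWhileEq arr pivot first
  -- for i in range(first): if arr[i] >= pivot: return False
  if ¬ ((List.range first).all fun i => !decide (pivot ≤ arr.getD i 0)) then false
  -- for i in range(first, second): if arr[i] != pivot: return False
  else if ¬ ((List.range' first (second - first)).all fun i => decide (arr.getD i 0 = pivot)) then false
  -- for i in range(second, len(arr)): if arr[i] <= pivot: return False
  else if ¬ ((List.range' second (arr.length - second)).all fun i => !decide (arr.getD i 0 ≤ pivot)) then false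
  else true

-- ===== PORT B =====
-- single pass with phase ∈ {0,1,2}
def pvAltGo (pivot : Int) (phase : Nat) : List Int → Bool
  | [] => true
  | x :: xs =>
    if phase = 0 then
      if x < pivot then pvAltGo pivot 0 xs
      else if x = pivot then pvAltGo pivot 1 xs
      else if x ≤ pivot then false else pvAltGo pivot 2 xs
    else if phase = 1 then
      if x = pivot then pvAltGo pivot 1 xs
      else if x ≤ pivot then false else pvAltGo pivot 2 xs
    else
      if x ≤ pivot then false else pvAltGo pivot 2 xs

def is_valid_partition_alt (arr : List Int) (pivot : Int) : Bool :=
  pvAltGo pivot 0 arr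

-- ===== PRECONDITION & SPEC =====
def Spec_is_valid_partition (arr : List Int) (pivot : Int) (out : Bool) : Prop := out = is_valid_partition_alt arr pivot
instance (arr : List Int) (pivot : Int) (out : Bool) : Decidable (Spec_is_valid_partition arr pivot out) := by unfold Spec_is_valid_partition; infer_instance

-- ===== CLAIM (what is proved, stated in full; the proofs are below) =====
def Claim_equal_is_valid_partition : Prop := ∀ (arr : List Int) (pivot : Int), Dom_is_valid_partition arr pivot → Spec_is_valid_partition arr pivot (is_valid_partition arr pivot)

-- ===== LEMMAS AND PROOFS =====

theorem whileLt_eq (arr : List Int) (pivot : Int) (i : Nat) :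
    pvWhileLt arr pivot i = i + ((arr.drop i).takeWhile (fun x => decide (x < pivot))).length := by
  fun_induction pvWhileLt arr pivot i with
  | case1 i h hlt ih =>
    rw [ih, ← List.getElem_cons_drop h, List.takeWhile_cons]
    simp [hlt]
    omega
  | case2 i h hlt =>
    rw [← List.getElem_cons_drop h, List.takeWhile_cons]
    simp [hlt]
  | case3 i h =>
    rw [List.drop_eq_nil_of_le (by omega)]
    simp

theorem whileEq_eq (arr : List Int) (pivot : Int) (i : Nat) :
    pvWhileEq arr pivot i = i + ((arr.drop i).takeWhile (fun x => decide (x = pivot))).length := by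
  fun_induction pvWhileEq arr pivot i with
  | case1 i h heq ih =>
    rw [ih, ← List.getElem_cons_drop h, List.takeWhile_cons]
    simp [heq]
    omega
  | case2 i h heq =>
    rw [← List.getElem_cons_drop h, List.takeWhile_cons]
    simp [heq]
  | case3 i h =>
    rw [List.drop_eq_nil_of_le (by omega)]
    simp

theorem altGo2 (pivot : Int) (xs : List Int) :
    pvAltGo pivot 2 xs = xs.all (fun x => decide (pivot < x)) := by
  induction xs with
  | nil => rfl
  | cons x xs ih =>
    simp only [pvAltGo, List.all_cons]
    by_cases h : x ≤ pivot
    · simp [h, show ¬ pivot < x by omega]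
    · simp [h, show pivot < x by omega, ih]

theorem altGo1 (pivot : Int) (xs : List Int) :
    pvAltGo pivot 1 xs = (xs.dropWhile (fun x => decide (x = pivot))).all (fun x => decide (pivot < x)) := by
  induction xs with
  | nil => rfl
  | cons x xs ih =>
    simp only [pvAltGo, List.dropWhile_cons]
    by_cases h : x = pivot
    · simp [h, ih]
    · by_cases h2 : x ≤ pivot
      · simp [h, h2, show ¬ pivot < x by omega]
      · simp [h, h2, show pivot < x by omega, altGo2]

theorem altGo0 (pivot : Int) (xs : List Int) :
    pvAltGo pivot 0 xs =
      ((xs.dropWhile (fun x => decide (x < pivot))).dropWhile (fun x => decide (x = pivot))).all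
        (fun x => decide (pivot < x)) := by
  induction xs with
  | nil => rfl
  | cons x xs ih =>
    simp only [pvAltGo, List.dropWhile_cons]
    by_cases h : x < pivot
    · simp [h, ih]
    · by_cases h1 : x = pivot
      · simp [h1, altGo1]
      · by_cases h2 : x ≤ pivot
        · simp [h, h1, h2, show ¬ pivot < x by omega]
        · simp [h, h1, h2, show pivot < x by omega, altGo2]

theorem a_eq (arr : List Int) (pivot : Int) :
    is_valid_partition arr pivot =
      ((arr.dropWhile (fun x => decide (x < pivot))).dropWhile (fun x => decide (x = pivot))).all
        (fun x => decide (pivot < x)) := by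
  set p : Int → Bool := fun x => decide (x < pivot) with hp
  set q : Int → Bool := fun x => decide (x = pivot) with hq
  have hdw : ∀ (g : Int → Bool) (l : List Int), l.drop (l.takeWhile g).length = l.dropWhile g := by
    intro g l
    induction l with
    | nil => rfl
    | cons x xs ih =>
      by_cases h : g x <;> simp [h, ih]
  have hra : ∀ (l : List Int) (s : Nat) (f : Int → Bool),
      ((List.range' s (l.length - s)).all (fun i => f (l.getD i 0))) = (l.drop s).all f := by
    intro l s f
    rw [Bool.eq_iff_iff]
    simp only [List.all_eq_true]
    constructor
    · intro h x hx
      obtain ⟨k, hk, rfl⟩ := List.mem_iff_getElem.mp hx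
      have hk2 : k < l.length - s := by simpa using hk
      have hk' : s + k < l.length := by omega
      have := h (s + k) (by rw [List.mem_range'_1]; omega)
      rw [List.getElem_drop]
      simpa [List.getD_eq_getElem, hk'] using this
    · intro h i hi
      rw [List.mem_range'_1] at hi
      have hil : i < l.length := by omega
      have hks : i - s < (l.drop s).length := by simp [List.length_drop]; omega
      have := h ((l.drop s)[i - s]) (List.getElem_mem hks)
      rw [List.getElem_drop] at this
      simp only [show s + (i - s) = i by omega] at this
      simpa [List.getD_eq_getElem, hil] using this
  have hfirst : pvWhileLt arr pivot 0 = (arr.takeWhile p).length := by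
    simpa using whileLt_eq arr pivot 0
  have hdropf : arr.drop (arr.takeWhile p).length = arr.dropWhile p := hdw p arr
  have hsecond : pvWhileEq arr pivot (pvWhileLt arr pivot 0) =
      (arr.takeWhile p).length + ((arr.dropWhile p).takeWhile q).length := by
    rw [hfirst, whileEq_eq, hdropf]
  have hlen1 : (arr.takeWhile p).length ≤ arr.length := (List.takeWhile_prefix p).length_le
  have hlendw : (arr.dropWhile p).length = arr.length - (arr.takeWhile p).length := by
    rw [← hdropf, List.length_drop]
  have hlen2 : ((arr.dropWhile p).takeWhile q).length ≤ (arr.dropWhile p).length :=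
    (List.takeWhile_prefix q).length_le
  -- check 1 always passes
  have hc1 : ((List.range (pvWhileLt arr pivot 0)).all fun i => !decide (pivot ≤ arr.getD i 0)) = true := by
    rw [hfirst, List.all_eq_true]
    intro i hi
    rw [List.mem_range] at hi
    have hil : i < arr.length := lt_of_lt_of_le hi hlen1
    have hget : (arr.takeWhile p)[i] = arr[i] := (List.takeWhile_prefix p).getElem hi
    have hpi : p ((arr.takeWhile p)[i]) := List.mem_takeWhile_imp (List.getElem_mem hi)
    rw [hget] at hpi
    have hpi' : arr[i] < pivot := by simpa [hp] using hpi
    simp [List.getD_eq_getElem, hil]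
    omega
  -- check 2 always passes
  have hc2 : ((List.range' (pvWhileLt arr pivot 0)
        (pvWhileEq arr pivot (pvWhileLt arr pivot 0) - pvWhileLt arr pivot 0)).all
        fun i => decide (arr.getD i 0 = pivot)) = true := by
    rw [hsecond, hfirst, List.all_eq_true]
    intro i hi
    rw [Nat.add_sub_cancel_left, List.mem_range'_1] at hi
    have hk : i - (arr.takeWhile p).length < ((arr.dropWhile p).takeWhile q).length := by omega
    have hil : i < arr.length := by omega
    have hg1 : ((arr.dropWhile p).takeWhile q)[i - (arr.takeWhile p).length] =
        (arr.dropWhile p)[i - (arr.takeWhile p).length]'(by omega) :=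
      (List.takeWhile_prefix q).getElem hk
    have hqi : q (((arr.dropWhile p).takeWhile q)[i - (arr.takeWhile p).length]) :=
      List.mem_takeWhile_imp (List.getElem_mem hk)
    have hg2 : (arr.dropWhile p)[i - (arr.takeWhile p).length]'(by omega) = arr[i] := by
      simp only [← hdropf]
      rw [List.getElem_drop]
      congr 1
      omega
    rw [hg1, hg2] at hqi
    have hqi' : arr[i] = pivot := by simpa [hq] using hqi
    simp [List.getD_eq_getElem, hil, hqi']
  -- check 3 equals the tail condition
  have hdrops : arr.drop (pvWhileEq arr pivot (pvWhileLt arr pivot 0)) =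
      (arr.dropWhile p).dropWhile q := by
    rw [hsecond, ← List.drop_drop, hdropf, hdw]
  have hc3 : ((List.range' (pvWhileEq arr pivot (pvWhileLt arr pivot 0))
        (arr.length - pvWhileEq arr pivot (pvWhileLt arr pivot 0))).all
        fun i => !decide (arr.getD i 0 ≤ pivot)) =
      ((arr.dropWhile p).dropWhile q).all (fun x => decide (pivot < x)) := by
    rw [hra arr _ (fun x => !decide (x ≤ pivot)), hdrops, Bool.eq_iff_iff]
    simp only [List.all_eq_true]
    constructor <;> intro h x hx <;> have := h x hx <;> simp at this ⊢ <;> omega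
  show (if ¬ _ then false else if ¬ _ then false else if ¬ _ then false else true) = _
  rw [hc1, hc2, hc3]
  simp only [not_true, if_false]
  by_cases h : ((arr.dropWhile p).dropWhile q).all (fun x => decide (pivot < x)) <;> simp [h]

-- ===== VERDICT (by name: the statement is the Claim_ definition above) =====
theorem is_valid_partition_spec : Claim_equal_is_valid_partition := by
  intro arr pivot _
  unfold Spec_is_valid_partition is_valid_partition_alt
  rw [a_eq, altGo0]
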